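-- pv_equiv track=rewrite | github.com/Toydrum/LyricMaker-backend | syllable-division-backend/common/utils.py | divide_into_syllables
-- ===== SOURCE A (Python) =====
-- def divide_into_syllables(word):
--     vowels = "aeiouy"
--     syllables = []
--     current_syllable = ""
--
--     for char in word:
--         if char.lower() in vowels:
--             if current_syllable and current_syllable[-1] not in vowels:
--                 syllables.append(current_syllable)
--                 current_syllable = char
--             else:
--                 current_syllable += char
--         else:
--             current_syllable += char
--
--     if current_syllable:
--         syllables.append(current_syllable)
--
--     return syllables
-- ===== SOURCE B (Python) =====
-- def divide_into_syllables(word):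
--     vowels = "aeiouy"
--     sylls = []
--     last = 0
--     for i in range(1, len(word)):
--         if word[i].lower() in vowels and word[i - 1] not in vowels:
--             sylls.append(word[last:i])
--             last = i
--     if word:
--         sylls.append(word[last:])
--     return sylls
-- ===== Notes on version B (the rewrite author's own statement) =====
-- stated objective: alternative
-- what changed: B drops A's growing current-syllable string accumulator: it scans indices 1..len-1, detects syllable boundaries from word[i]/word[i-1] directly, and emits each syllable as a slice word[last:i] of the original word.
import Mathlib
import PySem

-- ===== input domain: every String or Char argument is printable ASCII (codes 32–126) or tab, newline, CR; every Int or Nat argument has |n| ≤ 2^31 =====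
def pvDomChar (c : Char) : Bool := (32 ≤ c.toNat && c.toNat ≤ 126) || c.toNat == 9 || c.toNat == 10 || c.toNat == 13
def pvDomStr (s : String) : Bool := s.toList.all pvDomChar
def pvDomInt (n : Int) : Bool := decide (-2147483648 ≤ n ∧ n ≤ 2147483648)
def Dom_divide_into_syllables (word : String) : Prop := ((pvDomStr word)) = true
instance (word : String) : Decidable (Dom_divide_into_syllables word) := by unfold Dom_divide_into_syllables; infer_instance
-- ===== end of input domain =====

-- B replaces A's growing current-syllable string by a single index scan that emits slices
-- of the word at syllable boundaries (objective: alternative decomposition, same cost).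

-- ===== PORT A =====
def pvVowels : List Char := ['a', 'e', 'i', 'o', 'u', 'y']

-- one iteration of A's for-loop; st = (syllables, current_syllable); strings kept as List Char
-- st.2.getLastD ' ' is current_syllable[-1], guarded by st.2 ≠ [] exactly as in the Python
def pvAStep (st : List (List Char) × List Char) (c : Char) : List (List Char) × List Char :=
  if PySem.Chars.lowerChar c ∈ pvVowels then
    if st.2 ≠ [] ∧ st.2.getLastD ' ' ∉ pvVowels then (st.1 ++ [st.2], [c])
    else (st.1, st.2 ++ [c])
  else (st.1, st.2 ++ [c])

def divide_into_syllables (word : String) : List String :=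
  let r := word.toList.foldl pvAStep ([], [])
  (if r.2 ≠ [] then r.1 ++ [r.2] else r.1).map String.ofList

-- ===== PORT B =====
-- one iteration of B's for-loop over range(1, len(word)); st = (sylls, last)
def pvBStep (cs : List Char) (st : List (List Char) × Int) (i : Int) : List (List Char) × Int :=
  if PySem.Chars.lowerChar (PySem.List.pyGetD cs i ' ') ∈ pvVowels ∧
      PySem.List.pyGetD cs (i - 1) ' ' ∉ pvVowels then
    (st.1 ++ [PySem.List.slice cs (some st.2) (some i)], i)
  else st

def divide_into_syllables_alt (word : String) : List String :=
  let cs := word.toList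
  let r := (PySem.List.pyRange 1 (cs.length : Int) 1).foldl (pvBStep cs) ([], 0)
  (if cs ≠ [] then r.1 ++ [PySem.List.slice cs (some r.2) none] else r.1).map String.ofList

-- ===== PRECONDITION & SPEC =====
def Spec_divide_into_syllables (word : String) (out : List String) : Prop := out = divide_into_syllables_alt word
instance (word : String) (out : List String) : Decidable (Spec_divide_into_syllables word out) := by unfold Spec_divide_into_syllables; infer_instance

-- ===== CLAIM (what is proved, stated in full; the proofs are below) =====
def Claim_equal_divide_into_syllables : Prop := ∀ (word : String), Dom_divide_into_syllables word → Spec_divide_into_syllables word (divide_into_syllables word)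

-- ===== LEMMAS AND PROOFS =====

lemma pvAStep_nil (s : List (List Char)) (c : Char) : pvAStep (s, []) c = (s, [c]) := by
  simp [pvAStep]

lemma pvTakeDrop_ne_nil {cs : List Char} {l k : Nat} (h1 : l < k) (h2 : k ≤ cs.length) :
    (cs.drop l).take (k - l) ≠ [] := by
  have hlen : ((cs.drop l).take (k - l)).length = k - l := by
    simp [List.length_take, List.length_drop]; omega
  intro h
  rw [h] at hlen
  simp at hlen
  omega

lemma pvGetLast_take_drop {cs : List Char} {l k : Nat} (h1 : l < k) (h2 : k ≤ cs.length) (d : Char) :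
    ((cs.drop l).take (k - l)).getLastD d = cs[k - 1]'(by omega) := by
  have hlen : ((cs.drop l).take (k - l)).length = k - l := by
    simp [List.length_take, List.length_drop]; omega
  rw [List.getLastD_eq_getLast?, List.getLast?_eq_getElem?, hlen,
    List.getElem?_take, if_pos (by omega), List.getElem?_drop,
    List.getElem?_eq_getElem (by omega : l + (k - l - 1) < cs.length)]
  simp only [Option.getD_some]
  congr 1
  omega

lemma pvTakeDrop_snoc {cs : List Char} {l k : Nat} (h1 : l ≤ k) (h2 : k < cs.length) :
    (cs.drop l).take (k - l) ++ [cs[k]'h2] = (cs.drop l).take (k + 1 - l) := by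
  have hs : k + 1 - l = (k - l) + 1 := by omega
  rw [hs, List.take_add_one, List.getElem?_drop,
    List.getElem?_eq_getElem (by omega : l + (k - l) < cs.length)]
  have hi : l + (k - l) = k := by omega
  simp [hi]

lemma pvInvBase (cs : List Char) (l : Nat) (syls : List (List Char)) (h1 : l < cs.length) :
    (if ((cs.drop cs.length).foldl pvAStep (syls, (cs.drop l).take (cs.length - l))).2 ≠ [] then
        ((cs.drop cs.length).foldl pvAStep (syls, (cs.drop l).take (cs.length - l))).1
          ++ [((cs.drop cs.length).foldl pvAStep (syls, (cs.drop l).take (cs.length - l))).2]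
      else ((cs.drop cs.length).foldl pvAStep (syls, (cs.drop l).take (cs.length - l))).1)
    =
    (if cs ≠ [] then
        ((PySem.List.pyRange (cs.length : Int) (cs.length : Int) 1).foldl (pvBStep cs) (syls, (l : Int))).1
          ++ [PySem.List.slice cs
                (some ((PySem.List.pyRange (cs.length : Int) (cs.length : Int) 1).foldl (pvBStep cs) (syls, (l : Int))).2) none]
      else ((PySem.List.pyRange (cs.length : Int) (cs.length : Int) 1).foldl (pvBStep cs) (syls, (l : Int))).1) := by
  rw [List.drop_length, PySem.List.pyRange_one_eq_nil (le_refl _)]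
  simp only [List.foldl_nil]
  have hcur : (cs.drop l).take (cs.length - l) = cs.drop l := by
    apply List.take_of_length_le; simp
  rw [hcur]
  have hne : cs.drop l ≠ [] := by
    intro h; have := congrArg List.length h; simp at this; omega
  have hcs : cs ≠ [] := by
    intro h; subst h; simp at h1
  rw [if_pos hne, if_pos hcs, PySem.List.slice_from_natCast]

lemma pvInv (cs : List Char) : ∀ (m k l : Nat) (syls : List (List Char)),
    cs.length ≤ k + m → l < k → k ≤ cs.length →
    (if ((cs.drop k).foldl pvAStep (syls, (cs.drop l).take (k - l))).2 ≠ [] then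
        ((cs.drop k).foldl pvAStep (syls, (cs.drop l).take (k - l))).1
          ++ [((cs.drop k).foldl pvAStep (syls, (cs.drop l).take (k - l))).2]
      else ((cs.drop k).foldl pvAStep (syls, (cs.drop l).take (k - l))).1)
    =
    (if cs ≠ [] then
        ((PySem.List.pyRange (k : Int) (cs.length : Int) 1).foldl (pvBStep cs) (syls, (l : Int))).1
          ++ [PySem.List.slice cs
                (some ((PySem.List.pyRange (k : Int) (cs.length : Int) 1).foldl (pvBStep cs) (syls, (l : Int))).2) none]
      else ((PySem.List.pyRange (k : Int) (cs.length : Int) 1).foldl (pvBStep cs) (syls, (l : Int))).1)  := by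
  intro m
  induction m with
  | zero =>
    intro k l syls hm h1 h2
    have hk : k = cs.length := by omega
    subst hk
    exact pvInvBase cs l syls (by omega)
  | succ m ih =>
    intro k l syls hm h1 h2
    by_cases hkn : cs.length ≤ k
    · have hk : k = cs.length := by omega
      subst hk
      exact pvInvBase cs l syls (by omega)
    · have hklen : k < cs.length := by omega
      have hga : PySem.List.pyGetD cs (k : Int) ' ' = cs[k]'hklen := by
        rw [PySem.List.pyGetD_natCast, List.getD_eq_getElem _ _ hklen]
      have hgb : PySem.List.pyGetD cs ((k : Int) - 1) ' ' = cs[k - 1]'(by omega) := by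
        have hc : (k : Int) - 1 = ((k - 1 : Nat) : Int) := by omega
        rw [hc, PySem.List.pyGetD_natCast, List.getD_eq_getElem _ _ (by omega)]
      have hcne : (cs.drop l).take (k - l) ≠ [] := pvTakeDrop_ne_nil h1 h2
      have hlast := pvGetLast_take_drop h1 h2 ' '
      rw [List.drop_eq_getElem_cons hklen, List.foldl_cons,
        PySem.List.pyRange_one_cons (by exact_mod_cast hklen), List.foldl_cons]
      by_cases hcut : PySem.Chars.lowerChar (cs[k]'hklen) ∈ pvVowels ∧ (cs[k - 1]'(by omega)) ∉ pvVowels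
      · have hA : pvAStep (syls, (cs.drop l).take (k - l)) (cs[k]'hklen)
            = (syls ++ [(cs.drop l).take (k - l)], [cs[k]'hklen]) := by
          unfold pvAStep
          rw [if_pos hcut.1, if_pos ⟨hcne, by rw [hlast]; exact hcut.2⟩]
        have hB : pvBStep cs (syls, (l : Int)) (k : Int)
            = (syls ++ [PySem.List.slice cs (some (l : Int)) (some (k : Int))], (k : Int)) := by
          unfold pvBStep
          rw [if_pos ⟨by rw [hga]; exact hcut.1, by rw [hgb]; exact hcut.2⟩]
        rw [hA, hB, PySem.List.slice_natCast]
        have hone : (cs.drop k).take (k + 1 - k) = [cs[k]'hklen] := by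
          rw [List.drop_eq_getElem_cons hklen]
          have hco : k + 1 - k = 1 := by omega
          rw [hco]
          rfl
        have hrec := ih (k + 1) k (syls ++ [(cs.drop l).take (k - l)]) (by omega) (by omega) (by omega)
        rw [hone] at hrec
        push_cast at hrec
        exact hrec
      · have hA : pvAStep (syls, (cs.drop l).take (k - l)) (cs[k]'hklen)
            = (syls, (cs.drop l).take (k - l) ++ [cs[k]'hklen]) := by
          unfold pvAStep
          by_cases hv : PySem.Chars.lowerChar (cs[k]'hklen) ∈ pvVowels
          · rw [if_pos hv, if_neg]
            intro hco
            exact hcut ⟨hv, by rw [hlast] at hco; exact hco.2⟩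
          · rw [if_neg hv]
        have hB : pvBStep cs (syls, (l : Int)) (k : Int) = (syls, (l : Int)) := by
          unfold pvBStep
          rw [if_neg]
          intro hco
          exact hcut ⟨by rw [hga] at hco; exact hco.1, by rw [hgb] at hco; exact hco.2⟩
        rw [hA, hB, pvTakeDrop_snoc (by omega) hklen]
        have hrec := ih (k + 1) l syls (by omega) (by omega) (by omega)
        push_cast at hrec
        exact hrec

-- ===== VERDICT (by name: the statement is the Claim_ definition above) =====
theorem divide_into_syllables_spec : Claim_equal_divide_into_syllables := by
  intro word _
  unfold Spec_divide_into_syllables divide_into_syllables divide_into_syllables_alt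
  cases hcs : word.toList with
  | nil => simp [PySem.List.pyRange_one_eq_nil (by norm_num : (0 : Int) ≤ 1)]
  | cons c cs' =>
    simp only [List.length_cons]
    congr 1
    have h := pvInv (c :: cs') (c :: cs').length 1 0 []
    simp only [List.drop_one, List.drop_zero, List.tail_cons, List.length_cons] at h ⊢
    rw [List.foldl_cons, pvAStep_nil]
    have h' := h (by omega) (by omega) (by omega)
    simpa using h'
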